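-- pv_equiv track=rewrite | github.com/Tongky-HGU/Algorithm | 대회,기출/카카오_2019_호텔방배정.py | solution
-- ===== SOURCE A (Python) =====
-- def solution(k, room_number):
--     def find(a):
--         if a not in room:
--             room[a] = a
--             return a
--         room[a] = find(room[a]+1)
--         return room[a]
--     room = {}
--     ans = [0 for _ in range(len(room_number))]
--     for i in range(len(room_number)):
--         ans[i] = find(room_number[i])
--     return ans
-- ===== SOURCE B (Python) =====
-- def solution(k, room_number):
--     room = {}
--     ans = []
--     for v in room_number:
--         path = []
--         cur = v
--         while cur in room:
--             path.append(cur)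
--             cur = room[cur] + 1
--         room[cur] = cur
--         for node in reversed(path):
--             room[node] = cur
--         ans.append(cur)
--     return ans
-- ===== Notes on version B (the rewrite author's own statement) =====
-- stated objective: alternative
-- what changed: Replaces A's recursive find (compression on the unwind) by an iterative walk that collects the probe chain in a list and compresses it in one pass afterwards, avoiding Python call-stack recursion.
import Mathlib
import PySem

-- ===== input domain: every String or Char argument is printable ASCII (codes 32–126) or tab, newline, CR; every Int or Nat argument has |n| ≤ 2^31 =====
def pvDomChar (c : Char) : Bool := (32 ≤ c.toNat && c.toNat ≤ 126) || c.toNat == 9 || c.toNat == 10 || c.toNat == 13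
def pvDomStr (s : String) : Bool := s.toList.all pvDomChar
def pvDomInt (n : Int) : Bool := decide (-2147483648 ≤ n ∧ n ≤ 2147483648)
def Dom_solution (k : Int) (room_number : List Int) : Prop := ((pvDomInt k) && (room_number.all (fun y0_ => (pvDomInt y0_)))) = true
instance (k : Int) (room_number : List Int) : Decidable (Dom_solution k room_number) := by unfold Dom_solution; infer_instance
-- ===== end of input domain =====

-- B replaces A's recursive `find` by an iterative walk that records the chain and
-- compresses it afterwards (objective: alternative decomposition, no Python recursion).

-- ===== PORT A =====
-- A's recursive find; `fuel` is a totality guard only (the chain visits distinct keys of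
-- the dict, so with fuel = len(room_number)+1 the 0-case is never reached on any input).
def findA : Nat → PySem.Dict Int Int → Int → Int × PySem.Dict Int Int
  | 0, _d, a => (a, _d)
  | fuel+1, d, a =>
    match d.get? a with
    | none => (a, d.insert a a)                                  -- room[a] = a; return a
    | some v =>
      let p := findA fuel d (v + 1)                              -- room[a] = find(room[a]+1)
      (p.1, p.2.insert a p.1)

def solution (k : Int) (room_number : List Int) : List Int :=
  let n := room_number.length
  -- room = {}; ans = [0]*n; for i in range(n): ans[i] = find(room_number[i])
  let st := (PySem.List.pyRange 0 (n : Int) 1).foldl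
    (fun st i =>
      let p := findA (n + 1) st.1 (PySem.List.pyGetD room_number i 0)
      (p.2, PySem.List.pySetD st.2 i p.1))
    ((PySem.Dict.empty : PySem.Dict Int Int), List.replicate n (0 : Int))
  st.2

-- ===== PORT B =====
-- while cur in room: path.append(cur); cur = room[cur]+1
-- then room[cur] = cur; for node in reversed(path): room[node] = cur; return cur
-- (`fuel` is the same totality guard as in port A).
def walkB : Nat → PySem.Dict Int Int → Int → List Int → Int × PySem.Dict Int Int
  | 0, d, cur, path => (cur, path.reverse.foldl (fun dd node => dd.insert node cur) d)
  | fuel+1, d, cur, path =>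
    match d.get? cur with
    | none => (cur, path.reverse.foldl (fun dd node => dd.insert node cur) (d.insert cur cur))
    | some v => walkB fuel d (v + 1) (path ++ [cur])

def solution_alt (k : Int) (room_number : List Int) : List Int :=
  let st := room_number.foldl
    (fun st v =>
      let p := walkB (room_number.length + 1) st.1 v []
      (p.2, st.2 ++ [p.1]))
    ((PySem.Dict.empty : PySem.Dict Int Int), ([] : List Int))
  st.2

-- ===== PRECONDITION & SPEC =====
def Spec_solution (k : Int) (room_number : List Int) (out : List Int) : Prop := out = solution_alt k room_number
instance (k : Int) (room_number : List Int) (out : List Int) : Decidable (Spec_solution k room_number out) := by unfold Spec_solution; infer_instance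

-- ===== CLAIM (what is proved, stated in full; the proofs are below) =====
def Claim_equal_solution : Prop := ∀ (k : Int) (room_number : List Int), Dom_solution k room_number → Spec_solution k room_number (solution k room_number)

-- ===== LEMMAS AND PROOFS =====

-- B's walk computes A's find: the iterative pass equals the recursion, with the collected
-- path compressed (in reverse, exactly A's unwind order) on top of find's resulting dict.
theorem walkB_eq_findA (fuel : Nat) :
    ∀ (d : PySem.Dict Int Int) (cur : Int) (path : List Int),
      walkB fuel d cur path =
        (let p := findA fuel d cur;
         (p.1, path.reverse.foldl (fun dd node => dd.insert node p.1) p.2)) := by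
  induction fuel with
  | zero => intro d cur path; rfl
  | succ fuel ih =>
    intro d cur path
    simp only [walkB, findA]
    cases h : d.get? cur with
    | none => simp
    | some v => simp [ih, List.reverse_append]

theorem walkB_nil_eq_findA (fuel : Nat) (d : PySem.Dict Int Int) (cur : Int) :
    walkB fuel d cur [] = findA fuel d cur := by
  rw [walkB_eq_findA]; simp

-- The outer loops agree: A fills slot j of the zero list at step j, B appends.
theorem outer_loop_eq (room_number : List Int) :
    ∀ (m j : Nat) (d : PySem.Dict Int Int) (done : List Int),
      j + m = room_number.length → done.length = j →
      (PySem.List.pyRange (j : Int) (room_number.length : Int) 1).foldl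
        (fun st i =>
          let p := findA (room_number.length + 1) st.1 (PySem.List.pyGetD room_number i 0)
          (p.2, PySem.List.pySetD st.2 i p.1))
        (d, done ++ List.replicate m (0 : Int))
      = (room_number.drop j).foldl
        (fun st v =>
          let p := walkB (room_number.length + 1) st.1 v []
          (p.2, st.2 ++ [p.1]))
        (d, done) := by
  intro m
  induction m with
  | zero =>
    intro j d done hjm hdone
    rw [PySem.List.pyRange_one_eq_nil (by omega)]
    rw [List.drop_of_length_le (by omega)]
    simp
  | succ m ih =>
    intro j d done hjm hdone
    have hj : j < room_number.length := by omega
    rw [PySem.List.pyRange_one_cons (by exact_mod_cast hj)]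
    rw [List.drop_eq_getElem_cons hj]
    simp only [List.foldl_cons]
    rw [walkB_nil_eq_findA]
    have hget : PySem.List.pyGetD room_number (j : Int) 0 = room_number[j] := by
      simp [PySem.List.pyGetD_natCast, List.getD_eq_getElem?_getD, hj]
    have hset : ∀ r : Int,
        PySem.List.pySetD (done ++ List.replicate (m + 1) (0 : Int)) (j : Int) r
          = (done ++ [r]) ++ List.replicate m (0 : Int) := by
      intro r
      rw [PySem.List.pySetD_natCast]
      rw [List.set_append_right _ _ (by omega)]
      simp [hdone, List.replicate_succ]
    rw [hget]
    simp only [hset]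
    have : ((j : Int) + 1) = ((j + 1 : Nat) : Int) := by push_cast; ring
    rw [this, ih (j + 1) _ (done ++ [_]) (by omega) (by simp [hdone])]

-- ===== VERDICT (by name: the statement is the Claim_ definition above) =====
theorem solution_spec : Claim_equal_solution := by
  intro k room_number _hdom
  unfold Spec_solution solution solution_alt
  have h := outer_loop_eq room_number room_number.length 0 PySem.Dict.empty [] (by omega) rfl
  simp only [Nat.cast_zero, List.nil_append, List.drop_zero] at h
  exact congrArg Prod.snd h
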